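-- pv_equiv track=rewrite | github.com/dengguojie/vue-element-admin | ops/built-in/tbe/impl/dynamic/bn_training_reduce.py | reorder_reduce_last_shape
-- ===== SOURCE A (Python) =====
-- def reorder_reduce_last_shape(shape_before_reduce, reduce_axis_index):
--     """
--     reorder shape (a4,r4,a3,r3,a2,r2,a1,r1) to (a4,a3,a2,a1,r4,r3,r2,r1)
--     :param shape_before_reduce: like(a4,r4,a3,r3,a2,r2,a1,r1)
--     :param reduce_axis_index
--     :return:
--     """
--     # `shape_before_reduce: (a4,r4,a3,r3,a2,r2,a1,r1)`
--
--     orignal_to_reorder_axis_map = {}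
--     reorder_to_orignal_axis_map = {}
--
--     reordered_shape = []
--     temp_axis = 0
--     for i, ele in enumerate(shape_before_reduce):
--         if i not in reduce_axis_index:
--             reordered_shape.append(ele)
--             reorder_to_orignal_axis_map[temp_axis] = i
--             orignal_to_reorder_axis_map[i] = temp_axis
--             temp_axis = temp_axis + 1
--
--     for i, ele in enumerate(shape_before_reduce):
--         if i in reduce_axis_index:
--             reordered_shape.append(ele)
--             reorder_to_orignal_axis_map[temp_axis] = i
--             orignal_to_reorder_axis_map[i] = temp_axis
--             temp_axis = temp_axis + 1
--
--     return reordered_shape, reorder_to_orignal_axis_map, orignal_to_reorder_axis_map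
-- ===== SOURCE B (Python) =====
-- def reorder_reduce_last_shape(shape_before_reduce, reduce_axis_index):
--     # Stable sort of the enumerated axes keyed by reduce-membership: False (keep)
--     # sorts before True (reduce), and stability preserves the relative order of
--     # each group, so this yields the reduce-axes-last permutation in one sort.
--     pairs = sorted(enumerate(shape_before_reduce),
--                    key=lambda p: p[0] in reduce_axis_index)
--     reordered_shape = [ele for _, ele in pairs]
--     reorder_to_orignal_axis_map = {new: orig for new, (orig, _) in enumerate(pairs)}
--     orignal_to_reorder_axis_map = {orig: new for new, (orig, _) in enumerate(pairs)}
--     return reordered_shape, reorder_to_orignal_axis_map, orignal_to_reorder_axis_map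
-- ===== Notes on version B (the rewrite author's own statement) =====
-- stated objective: alternative
-- what changed: B replaces A's two interleaved filter-and-append passes with counter bookkeeping by a single stable sort of enumerate(shape) keyed by reduce-membership (False before True), then reads the reordered shape and both axis maps directly off the sorted (orig, ele) pairs.
import Mathlib
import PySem

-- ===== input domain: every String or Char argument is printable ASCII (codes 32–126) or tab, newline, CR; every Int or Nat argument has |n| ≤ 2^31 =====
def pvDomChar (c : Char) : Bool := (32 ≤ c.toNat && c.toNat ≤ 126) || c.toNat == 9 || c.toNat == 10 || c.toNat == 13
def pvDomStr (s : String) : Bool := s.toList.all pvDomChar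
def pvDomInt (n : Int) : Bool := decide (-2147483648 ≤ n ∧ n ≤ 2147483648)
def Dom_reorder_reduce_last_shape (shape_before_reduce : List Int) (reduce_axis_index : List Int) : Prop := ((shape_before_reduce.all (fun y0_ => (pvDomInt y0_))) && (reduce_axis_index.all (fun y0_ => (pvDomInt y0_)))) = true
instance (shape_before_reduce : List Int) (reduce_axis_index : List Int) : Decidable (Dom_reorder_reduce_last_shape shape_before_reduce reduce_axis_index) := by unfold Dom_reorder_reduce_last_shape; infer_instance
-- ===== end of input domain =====

-- B replaces A's two interleaved filtering passes with one stable sort of the enumerated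
-- axes keyed by reduce-membership, then reads shape and both maps off the sorted pairs
-- (objective: alternative).

-- ===== PORT A =====
-- state: (reordered_shape, reorder_to_orignal_axis_map, orignal_to_reorder_axis_map, temp_axis)
def reorder_reduce_last_shape (shape_before_reduce : List Int) (reduce_axis_index : List Int) : List Int × (List (Int × Int)) × (List (Int × Int)) :=
  let s1 := (PySem.List.enumerate shape_before_reduce 0).foldl
    (fun st p =>
      if p.1 ∉ reduce_axis_index then
        (st.1 ++ [p.2], st.2.1.insert st.2.2.2 p.1, st.2.2.1.insert p.1 st.2.2.2, st.2.2.2 + 1)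
      else st)
    (([] : List Int), (PySem.Dict.empty : PySem.Dict Int Int), (PySem.Dict.empty : PySem.Dict Int Int), (0 : Int))
  let s2 := (PySem.List.enumerate shape_before_reduce 0).foldl
    (fun st p =>
      if p.1 ∈ reduce_axis_index then
        (st.1 ++ [p.2], st.2.1.insert st.2.2.2 p.1, st.2.2.1.insert p.1 st.2.2.2, st.2.2.2 + 1)
      else st)
    s1
  (s2.1, s2.2.1.items, s2.2.2.1.items)

-- ===== PORT B =====
-- Python's bool key (False < True) is Lean's Bool with its order (false < true); exact.
def reorder_reduce_last_shape_alt (shape_before_reduce : List Int) (reduce_axis_index : List Int) : List Int × (List (Int × Int)) × (List (Int × Int)) :=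
  let pairs := PySem.List.sorted (PySem.List.enumerate shape_before_reduce 0)
    (fun p => decide (p.1 ∈ reduce_axis_index))
  let reordered_shape := pairs.map (·.2)
  let reorder_to_orignal_axis_map := (PySem.List.enumerate pairs 0).foldl
    (fun (d : PySem.Dict Int Int) p => d.insert p.1 p.2.1) PySem.Dict.empty
  let orignal_to_reorder_axis_map := (PySem.List.enumerate pairs 0).foldl
    (fun (d : PySem.Dict Int Int) p => d.insert p.2.1 p.1) PySem.Dict.empty
  (reordered_shape, reorder_to_orignal_axis_map.items, orignal_to_reorder_axis_map.items)

-- ===== PRECONDITION & SPEC =====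
def Spec_reorder_reduce_last_shape (shape_before_reduce : List Int) (reduce_axis_index : List Int) (out : List Int × (List (Int × Int)) × (List (Int × Int))) : Prop := out = reorder_reduce_last_shape_alt shape_before_reduce reduce_axis_index
instance (shape_before_reduce : List Int) (reduce_axis_index : List Int) (out : List Int × (List (Int × Int)) × (List (Int × Int))) : Decidable (Spec_reorder_reduce_last_shape shape_before_reduce reduce_axis_index out) := by unfold Spec_reorder_reduce_last_shape; infer_instance

-- ===== CLAIM =====
def Claim_equal_reorder_reduce_last_shape : Prop := ∀ (shape_before_reduce : List Int) (reduce_axis_index : List Int), Dom_reorder_reduce_last_shape shape_before_reduce reduce_axis_index → Spec_reorder_reduce_last_shape shape_before_reduce reduce_axis_index (reorder_reduce_last_shape shape_before_reduce reduce_axis_index)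

-- ===== LEMMAS AND PROOFS =====

-- inserting below a suffix that is all "before": lands exactly between the two blocks
theorem pv_insertBy_mid {α : Type} (before : α → α → Bool) (x : α) :
    ∀ (A0 A1 : List α), (∀ y ∈ A0, before x y = false) → (∀ y ∈ A1, before x y = true) →
      PySem.List.insertBy before x (A0 ++ A1) = A0 ++ x :: A1 := by
  intro A0
  induction A0 with
  | nil =>
      intro A1 _ h1
      cases A1 with
      | nil => rfl
      | cons y ys => simp [PySem.List.insertBy, h1 y (by simp)]
  | cons y ys ih =>
      intro A1 h0 h1
      simp only [List.cons_append, PySem.List.insertBy, h0 y (by simp), Bool.false_eq_true,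
        if_false]
      exact congrArg _ (ih A1 (fun a ha => h0 a (by simp [ha])) h1)

-- a stable sort by a Bool key is: the false-keyed block, then the true-keyed block
theorem pv_sorted_bool_key {α : Type} (key : α → Bool) :
    ∀ (xs : List α),
      PySem.List.sorted xs key = xs.filter (fun x => !key x) ++ xs.filter (fun x => key x) := by
  intro xs
  rw [PySem.List.sorted_eq_foldl_insertBy]
  induction xs using List.reverseRecOn with
  | nil => rfl
  | append_singleton l x ih =>
      rw [List.foldl_append, List.foldl_cons, List.foldl_nil, ih]
      cases hx : key x with
      | true =>
          rw [PySem.List.insertBy_of_forall_not_before _ _ _ (by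
            intro y _; simp [hx])]
          simp [List.filter_append, hx]
      | false =>
          rw [pv_insertBy_mid _ _ _ _
            (by intro y hy; simp only [List.mem_filter, Bool.not_eq_true'] at hy
                simp [hx, hy.2])
            (by intro y hy; simp only [List.mem_filter] at hy; simp [hx, hy.2])]
          simp [List.filter_append, hx]

-- a guarded fold is a fold over the filtered list
theorem pv_foldl_ite_filter {α σ : Type} (P : α → Prop) [DecidablePred P] (f : σ → α → σ) :
    ∀ (L : List α) (st : σ),
      L.foldl (fun s x => if P x then f s x else s) st
        = (L.filter (fun x => decide (P x))).foldl f st := by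
  intro L
  induction L with
  | nil => intro st; rfl
  | cons x xs ih =>
      intro st
      by_cases h : P x <;> simp [h, ih]

-- the unconditional body of A's loops, over a list of (index, element) pairs
theorem pv_main :
    ∀ (q : List (Int × Int)) (rs : List Int) (d1 d2 : PySem.Dict Int Int) (t : Int),
      q.foldl
        (fun (st : List Int × PySem.Dict Int Int × PySem.Dict Int Int × Int) p =>
          (st.1 ++ [p.2], st.2.1.insert st.2.2.2 p.1, st.2.2.1.insert p.1 st.2.2.2, st.2.2.2 + 1))
        (rs, d1, d2, t)
      = (rs ++ q.map (·.2),
         (PySem.List.enumerate q t).foldl (fun d p => d.insert p.1 p.2.1) d1,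
         (PySem.List.enumerate q t).foldl (fun d p => d.insert p.2.1 p.1) d2,
         t + q.length) := by
  intro q
  induction q with
  | nil => intro rs d1 d2 t; simp [PySem.List.enumerate_nil]
  | cons p q ih =>
      intro rs d1 d2 t
      simp only [List.foldl_cons, List.map_cons, PySem.List.enumerate_cons, ih,
        List.length_cons, Prod.mk.injEq]
      refine ⟨by simp, trivial, trivial, by push_cast; ring⟩

-- ===== VERDICT =====
theorem reorder_reduce_last_shape_spec : Claim_equal_reorder_reduce_last_shape := by
  intro shape ridx _
  unfold Spec_reorder_reduce_last_shape
  simp only [reorder_reduce_last_shape, reorder_reduce_last_shape_alt]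
  rw [pv_foldl_ite_filter (fun p : Int × Int => p.1 ∉ ridx),
      pv_foldl_ite_filter (fun p : Int × Int => p.1 ∈ ridx),
      ← List.foldl_append, pv_main,
      pv_sorted_bool_key (fun p : Int × Int => decide (p.1 ∈ ridx))]
  simp
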